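-- pv_equiv track=rewrite | github.com/HSJZY/HuaweiCodeCraft2018 | predictor.py | acc_sum
-- ===== SOURCE A (Python) =====
-- def acc_sum(dataset):
--     acc_res=[]
--     for line in dataset:
--         cur_acc=[]
--         cur_sum=0
--         for data in line:
--             cur_sum+=data
--             cur_acc.append(cur_sum)
--         acc_res.append(cur_acc)
--     return acc_res
-- ===== SOURCE B (Python) =====
-- def acc_sum(dataset):
--     return [[sum(line[:i + 1]) for i in range(len(line))] for line in dataset]
-- ===== Notes on version B (the rewrite author's own statement) =====
-- stated objective: simpler
-- what changed: Replaces the running-accumulator double loop with a nested comprehension that recomputes each prefix sum as sum(line[:i+1]) over growing slices.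
import Mathlib
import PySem

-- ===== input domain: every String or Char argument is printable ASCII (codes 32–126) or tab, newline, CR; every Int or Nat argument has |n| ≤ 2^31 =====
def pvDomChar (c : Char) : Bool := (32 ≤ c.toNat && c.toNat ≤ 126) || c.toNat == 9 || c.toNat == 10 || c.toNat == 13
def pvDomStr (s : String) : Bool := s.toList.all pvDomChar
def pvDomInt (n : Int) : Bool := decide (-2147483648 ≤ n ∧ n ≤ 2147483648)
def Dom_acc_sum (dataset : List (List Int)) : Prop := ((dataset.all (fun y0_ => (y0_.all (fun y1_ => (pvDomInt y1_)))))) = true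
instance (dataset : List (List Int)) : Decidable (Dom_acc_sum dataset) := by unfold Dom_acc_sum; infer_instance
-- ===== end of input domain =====

-- B replaces the running-accumulator double loop with a nested comprehension re-summing each prefix slice (simpler to read; not faster).


-- ===== PORT A =====
-- inner loop: cur_acc/cur_sum state, append running sum
def acc_sum (dataset : List (List Int)) : List (List Int) :=
  dataset.foldl
    (fun acc_res line =>
      let st := line.foldl
        (fun (p : List Int × Int) data =>
          let cur_sum := p.2 + data
          (p.1 ++ [cur_sum], cur_sum)) ([], 0)
      acc_res ++ [st.1]) []

-- ===== PORT B =====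
-- [[sum(line[:i+1]) for i in range(len(line))] for line in dataset]
def acc_sum_alt (dataset : List (List Int)) : List (List Int) :=
  dataset.map (fun line =>
    (List.range line.length).map (fun i => (line.take (i + 1)).sum))

-- ===== PRECONDITION & SPEC =====
def Spec_acc_sum (dataset : List (List Int)) (out : List (List Int)) : Prop := out = acc_sum_alt dataset
instance (dataset : List (List Int)) (out : List (List Int)) : Decidable (Spec_acc_sum dataset out) := by unfold Spec_acc_sum; infer_instance

-- ===== CLAIM (what is proved, stated in full; the proofs are below) =====
def Claim_equal_acc_sum : Prop := ∀ (dataset : List (List Int)), Dom_acc_sum dataset → Spec_acc_sum dataset (acc_sum dataset)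

-- ===== LEMMAS AND PROOFS =====
theorem acc_sum_inner (line : List Int) (acc : List Int) (s : Int) :
    (line.foldl (fun (p : List Int × Int) data =>
        let cur_sum := p.2 + data
        (p.1 ++ [cur_sum], cur_sum)) (acc, s)).1
      = acc ++ (List.range line.length).map (fun i => s + (line.take (i + 1)).sum) := by
  induction line generalizing acc s with
  | nil => simp
  | cons d t ih =>
      simp only [List.foldl_cons, ih, List.length_cons, List.range_succ_eq_map]
      simp [List.append_assoc, Nat.succ_eq_add_one, List.take_succ_cons, add_assoc]

theorem acc_sum_outer (dataset : List (List Int)) (acc : List (List Int)) :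
    dataset.foldl
      (fun acc_res line =>
        let st := line.foldl
          (fun (p : List Int × Int) data =>
            let cur_sum := p.2 + data
            (p.1 ++ [cur_sum], cur_sum)) ([], 0)
        acc_res ++ [st.1]) acc
    = acc ++ acc_sum_alt dataset := by
  induction dataset generalizing acc with
  | nil => simp [acc_sum_alt]
  | cons l t ih =>
      rw [List.foldl_cons, ih]
      simp [acc_sum_alt, acc_sum_inner l [] 0]

-- ===== VERDICT (by name: the statement is the Claim_ definition above) =====
theorem acc_sum_spec : Claim_equal_acc_sum := by
  intro dataset _
  unfold Spec_acc_sum acc_sum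
  simpa using acc_sum_outer dataset []
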